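-- pv_equiv track=rewrite | github.com/yuhyunjeong/python_algorithm_study | yuhyun/COS Pro/level2_part3_2.py | solution
-- ===== SOURCE A (Python) =====
-- def solution(arr, k):
--     answer = 0
--
--     lst = []
--
--     for i in arr:
--         for j in i:
--             lst.append(j)
--
--     lst.sort()
--
--     answer = lst[k-1]
--
--     return answer
-- ===== SOURCE B (Python) =====
-- def solution(arr, k):
--     lst = [x for row in arr for x in row]
--     idx = (k - 1) % len(lst)
--     while True:
--         p = lst[len(lst) // 2]
--         lt = [x for x in lst if x < p]
--         eq = [x for x in lst if x == p]
--         if idx < len(lt):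
--             lst = lt
--         elif idx < len(lt) + len(eq):
--             return p
--         else:
--             idx -= len(lt) + len(eq)
--             lst = [x for x in lst if x > p]
-- ===== Notes on version B (the rewrite author's own statement) =====
-- stated objective: alternative
-- what changed: Replaces flatten-then-full-sort-then-index with an iterative three-way-partition quickselect (middle-element pivot) for the k-th order statistic, handling Python's negative index via (k-1) % n; asymptotically O(n) expected but not measurably faster than A's C-implemented sort in practice.
import Mathlib
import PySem

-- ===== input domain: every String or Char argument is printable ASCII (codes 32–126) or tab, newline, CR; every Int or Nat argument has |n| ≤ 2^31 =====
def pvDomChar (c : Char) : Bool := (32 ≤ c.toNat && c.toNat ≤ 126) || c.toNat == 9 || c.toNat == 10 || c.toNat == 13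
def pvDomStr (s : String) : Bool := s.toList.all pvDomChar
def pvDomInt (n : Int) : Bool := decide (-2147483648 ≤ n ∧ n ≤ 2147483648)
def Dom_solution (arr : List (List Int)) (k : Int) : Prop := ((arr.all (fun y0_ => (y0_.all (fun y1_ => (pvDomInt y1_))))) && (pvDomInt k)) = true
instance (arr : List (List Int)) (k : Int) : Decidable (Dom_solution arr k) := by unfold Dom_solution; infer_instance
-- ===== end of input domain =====

-- B replaces flatten + full sort + index with an iterative three-way quickselect (middle pivot); a different algorithm, not claimed faster.
-- ===== PORT A =====
def solution (arr : List (List Int)) (k : Int) : Int :=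
  let lst := arr.foldl (fun acc i => i.foldl (fun acc2 j => acc2 ++ [j]) acc) []
  let lst := PySem.List.sorted lst (fun x => x) false
  let answer := PySem.List.pyGetD lst (k - 1) 0
  answer

-- ===== PORT B =====
-- quickselect loop of Source B (each iteration shrinks lst, the [] case is unreachable since idx < lst.length)
-- the pivot lst[len(lst)//2] is an element of lst, so the < and > partitions are strictly shorter
lemma filter_rel_pivot_lt_length (l : List Int) (q : Int → Int → Bool) (hq : ∀ x, q x x = false)
    (hl : l ≠ []) : (l.filter (fun x => q x (l.getD (l.length / 2) 0))).length < l.length := by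
  have hlt : l.length / 2 < l.length := Nat.div_lt_self (List.length_pos_iff.mpr hl) (by omega)
  rw [List.getD_eq_getElem l 0 hlt]
  rw [List.length_filter_lt_length_iff_exists]
  exact ⟨l[l.length / 2], List.getElem_mem hlt, by simp [hq]⟩

def qsel : List Int → Nat → Int
  | [], _ => 0
  | a :: rest, idx =>
    -- p = lst[len(lst) // 2]: the index is len//2 < len, so plain getD is exact here
    let p := (a :: rest).getD ((a :: rest).length / 2) 0
    let lt := (a :: rest).filter (fun x => x < p)
    let eq := (a :: rest).filter (fun x => x == p)
    if idx < lt.length then qsel lt idx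
    else if idx < lt.length + eq.length then p
    else qsel ((a :: rest).filter (fun x => p < x)) (idx - (lt.length + eq.length))
termination_by lst _ => lst.length
decreasing_by
  · exact filter_rel_pivot_lt_length _ (fun x y => decide (x < y)) (by simp) (by simp)
  · exact filter_rel_pivot_lt_length _ (fun x y => decide (y < x)) (by simp) (by simp)

def solution_alt (arr : List (List Int)) (k : Int) : Int :=
  let lst := arr.flatten
  let idx := PySem.Int.mod (k - 1) lst.length
  qsel lst idx.toNat

-- ===== PRECONDITION & SPEC =====
-- Pre_ excludes exactly the inputs where A raises IndexError (k-1 outside Python range of the flattened list).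
def Pre_solution (arr : List (List Int)) (k : Int) : Prop :=
  PySem.Raise.InRange arr.flatten.length (k - 1)
instance (arr : List (List Int)) (k : Int) : Decidable (Pre_solution arr k) := by unfold Pre_solution; infer_instance
def pvWitness_solution : List (List Int) × Int := ([[3, 1], [2]], 2)
def Spec_solution (arr : List (List Int)) (k : Int) (out : Int) : Prop := out = solution_alt arr k
instance (arr : List (List Int)) (k : Int) (out : Int) : Decidable (Spec_solution arr k out) := by unfold Spec_solution; infer_instance

-- ===== CLAIM (what is proved, stated in full; the proofs are below) =====
def Claim_equal_solution : Prop := ∀ (arr : List (List Int)) (k : Int), Dom_solution arr k → Pre_solution arr k → Spec_solution arr k (solution arr k)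

-- ===== LEMMAS AND PROOFS =====

-- A's nested append loop builds the flattened list
lemma foldl_append_flatten (arr : List (List Int)) (acc : List Int) :
    arr.foldl (fun acc i => i.foldl (fun acc2 j => acc2 ++ [j]) acc) acc = acc ++ arr.flatten := by
  induction arr generalizing acc with
  | nil => simp
  | cons hd tl ih =>
    have inner : ∀ (i : List Int) (a : List Int), i.foldl (fun acc2 j => acc2 ++ [j]) a = a ++ i := by
      intro i; induction i with
      | nil => simp
      | cons x xs ihx => intro a; simp [ihx]
    simp only [List.foldl_cons]
    rw [inner, ih]
    simp

-- all elements equal ⇒ pairwise ≤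
lemma pairwise_le_of_all_eq (p : Int) : ∀ (L : List Int), (∀ x ∈ L, x = p) → L.Pairwise (· ≤ ·) := by
  intro L
  induction L with
  | nil => intro _; exact List.Pairwise.nil
  | cons a t ih =>
    intro h
    refine List.Pairwise.cons ?_ (ih fun x hx => h x (List.mem_cons_of_mem _ hx))
    intro b hb
    rw [h a List.mem_cons_self, h b (List.mem_cons_of_mem _ hb)]

-- three-way filter partition is a permutation of the list
lemma partition_perm (p : Int) (l : List Int) :
    (l.filter (fun x => decide (x < p)) ++ l.filter (fun x => x == p) ++ l.filter (fun x => decide (p < x))).Perm l := by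
  rw [List.perm_iff_count]
  intro a
  simp only [List.count_append]
  have hz : ∀ (q : Int → Bool), q a = false → List.count a (l.filter q) = 0 := by
    intro q hq
    refine List.count_eq_zero_of_not_mem ?_
    intro hmem
    rw [List.mem_filter, hq] at hmem
    exact Bool.false_ne_true hmem.2
  rcases lt_trichotomy a p with h | h | h
  · rw [List.count_filter (by simp [h]), hz _ (by simp [h.ne]), hz _ (by simp [not_lt.mpr h.le])]
    omega
  · subst h
    rw [hz _ (by simp), List.count_filter (by simp), hz _ (by simp)]
    omega
  · rw [hz _ (by simp [not_lt.mpr h.le]), hz _ (by simp [h.ne']), List.count_filter (by simp [h])]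
    omega

-- the sorted list of l splits at any pivot p into sorted(<p) ++ (=p) ++ sorted(>p)
lemma sorted_decomp (p : Int) (l : List Int) :
    PySem.List.sorted l (fun x => x) false =
      PySem.List.sorted (l.filter (fun x => decide (x < p))) (fun x => x) false
        ++ l.filter (fun x => x == p)
        ++ PySem.List.sorted (l.filter (fun x => decide (p < x))) (fun x => x) false := by
  apply PySem.List.sorted_id_eq_of_perm_of_pairwise
  · exact (List.Perm.append (List.Perm.append (PySem.List.sorted_perm _ _ _) (List.Perm.refl _))
      (PySem.List.sorted_perm _ _ _)).trans (partition_perm p l)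
  · have hmemlt : ∀ x ∈ PySem.List.sorted (l.filter (fun x => decide (x < p))) (fun x => x) false, x < p := by
      intro x hx
      rw [PySem.List.mem_sorted, List.mem_filter] at hx
      exact of_decide_eq_true hx.2
    have hmemeq : ∀ x ∈ l.filter (fun x => x == p), x = p := by
      intro x hx
      rw [List.mem_filter] at hx
      exact eq_of_beq hx.2
    have hmemgt : ∀ x ∈ PySem.List.sorted (l.filter (fun x => decide (p < x))) (fun x => x) false, p < x := by
      intro x hx
      rw [PySem.List.mem_sorted, List.mem_filter] at hx
      exact of_decide_eq_true hx.2
    rw [List.pairwise_append, List.pairwise_append]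
    refine ⟨⟨PySem.List.sorted_pairwise _ _, pairwise_le_of_all_eq p _ hmemeq, ?_⟩,
      PySem.List.sorted_pairwise _ _, ?_⟩
    · intro a ha b hb
      rw [hmemeq b hb]
      exact (hmemlt a ha).le
    · intro a ha b hb
      rcases List.mem_append.mp ha with ha | ha
      · exact ((hmemlt a ha).trans (hmemgt b hb)).le
      · rw [hmemeq a ha]
        exact (hmemgt b hb).le

-- core: quickselect returns the idx-th element of the sorted list
lemma qsel_sorted : ∀ (n : Nat) (l : List Int) (idx : Nat), l.length ≤ n → idx < l.length →
    qsel l idx = (PySem.List.sorted l (fun x => x) false).getD idx 0 := by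
  intro n
  induction n with
  | zero =>
    intro l idx hn hidx
    omega
  | succ m ih =>
    intro l idx hn hidx
    match l with
    | [] => simp at hidx
    | a :: rest =>
      have hne : (a :: rest) ≠ [] := by simp
      have hltlen : ((a :: rest).filter (fun x => decide (x < (a :: rest).getD ((a :: rest).length / 2) 0))).length < (a :: rest).length :=
        filter_rel_pivot_lt_length _ (fun x y => decide (x < y)) (by simp) hne
      have hgtlen : ((a :: rest).filter (fun x => decide ((a :: rest).getD ((a :: rest).length / 2) 0 < x))).length < (a :: rest).length :=
        filter_rel_pivot_lt_length _ (fun x y => decide (y < x)) (by simp) hne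
      generalize hp : (a :: rest).getD ((a :: rest).length / 2) 0 = p at *
      have hsum : ((a :: rest).filter (fun x => decide (x < p))).length
          + ((a :: rest).filter (fun x => x == p)).length
          + ((a :: rest).filter (fun x => decide (p < x))).length = rest.length + 1 := by
        have h := (partition_perm p (a :: rest)).length_eq
        simp only [List.length_append, List.length_cons] at h
        omega
      have hs1len : (PySem.List.sorted ((a :: rest).filter (fun x => decide (x < p))) (fun x => x) false).length
          = ((a :: rest).filter (fun x => decide (x < p))).length :=
        PySem.List.length_sorted _ _ _
      simp only [List.length_cons] at hltlen hgtlen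
      rw [qsel, hp, sorted_decomp p (a :: rest)]
      split
      · next h =>
        rw [ih _ idx (by simp at hn; omega) h]
        rw [List.append_assoc, List.getD_append _ _ _ _ (by omega)]
      · split
        · next h1 h2 =>
          rw [List.append_assoc, List.getD_append_right _ _ _ _ (by omega),
              List.getD_append _ _ _ _ (by omega)]
          have hj : idx - (PySem.List.sorted ((a :: rest).filter (fun x => decide (x < p))) (fun x => x) false).length
              < ((a :: rest).filter (fun x => x == p)).length := by
            simp at hidx
            omega
          rw [List.getD_eq_getElem _ _ hj]
          have hmem : ((a :: rest).filter (fun x => x == p))[idx - (PySem.List.sorted ((a :: rest).filter (fun x => decide (x < p))) (fun x => x) false).length] ∈ (a :: rest).filter (fun x => x == p) :=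
            List.getElem_mem _
          rw [List.mem_filter] at hmem
          exact (eq_of_beq hmem.2).symm
        · next h1 h2 =>
          have hidx' : idx - (((a :: rest).filter (fun x => decide (x < p))).length
              + ((a :: rest).filter (fun x => x == p)).length)
              < ((a :: rest).filter (fun x => decide (p < x))).length := by
            simp at hidx
            omega
          rw [ih _ _ (by simp at hn; omega) hidx']
          rw [List.append_assoc, List.getD_append_right _ _ _ _ (by omega),
              List.getD_append_right _ _ _ _ (by omega)]
          congr 1
          omega

-- Python xs[i] under InRange equals plain indexing at (i mod len)
lemma pyGetD_mod (xs : List Int) (i : Int) (d : Int) (h : PySem.Raise.InRange xs.length i) :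
    PySem.List.pyGetD xs i d = xs.getD (PySem.Int.mod i (xs.length : Int)).toNat d := by
  obtain ⟨h1, h2⟩ := h
  have hn : 0 < (xs.length : Int) := by omega
  rw [PySem.Int.mod_eq_emod_of_pos hn]
  unfold PySem.List.pyGetD PySem.List.pyGet? PySem.List.pyIdx?
  by_cases hi : 0 ≤ i
  · rw [if_pos hi, if_pos h2]
    rw [Int.emod_eq_of_lt hi h2]
    simp [List.getD]
  · rw [if_neg hi, if_pos h1]
    have hshift : i % (xs.length : Int) = i + xs.length := by
      have h3 : (i + (xs.length : Int) * 1) % (xs.length : Int) = i % (xs.length : Int) :=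
        Int.add_mul_emod_self_left i (xs.length : Int) 1
      have h4 : (i + (xs.length : Int)) % (xs.length : Int) = i + xs.length :=
        Int.emod_eq_of_lt (by omega) (by omega)
      rw [mul_one] at h3
      omega
    have hmod : (i % (xs.length : Int)).toNat = xs.length - (-i).toNat := by
      rw [hshift]
      omega
    rw [hmod]
    simp [List.getD]

-- ===== VERDICT (by name: the statement is the Claim_ definition above) =====
theorem solution_spec : Claim_equal_solution := by
  intro arr k _ hpre
  unfold Pre_solution at hpre
  unfold Spec_solution solution solution_alt
  dsimp only
  rw [foldl_append_flatten arr [], List.nil_append]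
  have hn : 0 < arr.flatten.length := by
    obtain ⟨h1, h2⟩ := hpre
    omega
  have hlen : (PySem.List.sorted arr.flatten (fun x => x) false).length = arr.flatten.length :=
    PySem.List.length_sorted _ _ _
  have hidx : (PySem.Int.mod (k - 1) (arr.flatten.length : Int)).toNat < arr.flatten.length := by
    rw [PySem.Int.mod_eq_emod_of_pos (by exact_mod_cast hn)]
    have h5 : 0 ≤ (k - 1) % (arr.flatten.length : Int) := Int.emod_nonneg _ (by omega)
    have h6 : (k - 1) % (arr.flatten.length : Int) < (arr.flatten.length : Int) :=
      Int.emod_lt_of_pos _ (by exact_mod_cast hn)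
    omega
  rw [pyGetD_mod _ _ _ (by rw [hlen]; exact hpre), hlen,
      qsel_sorted arr.flatten.length arr.flatten _ le_rfl hidx]
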